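-- pv_equiv track=rewrite | github.com/ElMooro/si | aws/lambdas/treasury-api/source/lambda_function.py | determine_overall_risk_level
-- ===== SOURCE A (Python) =====
-- def determine_overall_risk_level(warnings):
--     """Determine overall risk level from warning signals"""
--     if any(w.get("level") == "ALERT" for w in warnings):
--         return "HIGH RISK"
--     elif any(w.get("level") == "WARNING" for w in warnings):
--         return "MODERATE RISK"
--     elif any(w.get("level") == "WATCH" for w in warnings):
--         return "ELEVATED WATCH"
--     else:
--         return "NORMAL"
-- ===== SOURCE B (Python) =====
-- def determine_overall_risk_level(warnings):
--     """Determine overall risk level from warning signals"""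
--     priority = {"ALERT": 3, "WARNING": 2, "WATCH": 1}
--     rank = max((priority.get(w.get("level"), 0) for w in warnings), default=0)
--     return ("NORMAL", "ELEVATED WATCH", "MODERATE RISK", "HIGH RISK")[rank]
-- ===== Notes on version B (the rewrite author's own statement) =====
-- stated objective: simpler
-- what changed: Replaces three priority-ordered short-circuit any-scans with a single max-reduction of a severity rank over the warnings, then one table lookup from rank to label.
import Mathlib
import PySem

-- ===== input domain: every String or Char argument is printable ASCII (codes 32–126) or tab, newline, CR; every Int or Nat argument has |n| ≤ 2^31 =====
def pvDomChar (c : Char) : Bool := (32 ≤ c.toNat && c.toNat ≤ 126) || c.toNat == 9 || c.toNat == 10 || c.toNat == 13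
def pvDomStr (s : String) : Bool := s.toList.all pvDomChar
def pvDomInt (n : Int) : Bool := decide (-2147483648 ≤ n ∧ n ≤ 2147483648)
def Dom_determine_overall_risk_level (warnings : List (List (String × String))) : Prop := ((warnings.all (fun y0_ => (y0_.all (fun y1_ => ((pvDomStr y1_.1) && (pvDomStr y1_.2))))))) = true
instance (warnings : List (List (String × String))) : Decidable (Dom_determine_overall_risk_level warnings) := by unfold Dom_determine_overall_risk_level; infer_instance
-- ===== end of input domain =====

-- B replaces A's three short-circuit any-scans with one max-reduction of a severity rank plus a table lookup (simpler, single pass).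


-- ===== PORT A =====
def determine_overall_risk_level (warnings : List (List (String × String))) : String :=
  if warnings.any (fun w => (PySem.Dict.mk w).get? "level" == some "ALERT") then "HIGH RISK"
  else if warnings.any (fun w => (PySem.Dict.mk w).get? "level" == some "WARNING") then "MODERATE RISK"
  else if warnings.any (fun w => (PySem.Dict.mk w).get? "level" == some "WATCH") then "ELEVATED WATCH"
  else "NORMAL"

-- ===== PORT B =====
-- priority.get(w.get("level"), 0), with None/unknown falling to the default 0
def pvPriorityGet (lvl : Option String) : Nat :=
  match lvl with
  | some "ALERT" => 3
  | some "WARNING" => 2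
  | some "WATCH" => 1
  | _ => 0

def determine_overall_risk_level_alt (warnings : List (List (String × String))) : String :=
  let rank := warnings.foldl (fun m w => max m (pvPriorityGet ((PySem.Dict.mk w).get? "level"))) 0
  -- ("NORMAL", "ELEVATED WATCH", "MODERATE RISK", "HIGH RISK")[rank]
  if rank = 3 then "HIGH RISK"
  else if rank = 2 then "MODERATE RISK"
  else if rank = 1 then "ELEVATED WATCH"
  else "NORMAL"

-- ===== PRECONDITION & SPEC =====
def Spec_determine_overall_risk_level (warnings : List (List (String × String))) (out : String) : Prop := out = determine_overall_risk_level_alt warnings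
instance (warnings : List (List (String × String))) (out : String) : Decidable (Spec_determine_overall_risk_level warnings out) := by unfold Spec_determine_overall_risk_level; infer_instance

-- ===== CLAIM (what is proved, stated in full; the proofs are below) =====
def Claim_equal_determine_overall_risk_level : Prop := ∀ (warnings : List (List (String × String))), Dom_determine_overall_risk_level warnings → Spec_determine_overall_risk_level warnings (determine_overall_risk_level warnings)

-- ===== LEMMAS AND PROOFS =====

-- the rank of one warning, as used by both sides of the proof
def pvRank (w : List (String × String)) : Nat := pvPriorityGet ((PySem.Dict.mk w).get? "level")

lemma pvRank_le_three (w : List (String × String)) : pvRank w ≤ 3 := by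
  unfold pvRank pvPriorityGet
  split <;> omega

lemma pvRank_eq_three_iff (w : List (String × String)) :
    pvRank w = 3 ↔ (PySem.Dict.mk w).get? "level" = some "ALERT" := by
  unfold pvRank pvPriorityGet
  split <;> simp_all

lemma pvRank_eq_two_iff (w : List (String × String)) :
    pvRank w = 2 ↔ (PySem.Dict.mk w).get? "level" = some "WARNING" := by
  unfold pvRank pvPriorityGet
  split <;> simp_all

lemma pvRank_eq_one_iff (w : List (String × String)) :
    pvRank w = 1 ↔ (PySem.Dict.mk w).get? "level" = some "WATCH" := by
  unfold pvRank pvPriorityGet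
  split <;> simp_all

-- the foldl max with any start accumulator
lemma pvFoldl_max (ws : List (List (String × String))) (a : Nat) :
    ws.foldl (fun m w => max m (pvRank w)) a =
      max a (ws.foldr (fun w r => max (pvRank w) r) 0) := by
  induction ws generalizing a with
  | nil => simp
  | cons w ws ih => simp [List.foldl_cons, List.foldr_cons, ih, Nat.max_assoc]

lemma pvMaxRank_le (ws : List (List (String × String))) (k : Nat)
    (h : ∀ w ∈ ws, pvRank w ≤ k) : ws.foldr (fun w r => max (pvRank w) r) 0 ≤ k := by
  induction ws with
  | nil => simp
  | cons w ws ih =>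
    simp only [List.foldr_cons, Nat.max_le]
    exact ⟨h w (by simp), ih (fun w hw => h w (by simp [hw]))⟩

lemma pvLe_maxRank (ws : List (List (String × String))) (w : List (String × String))
    (h : w ∈ ws) : pvRank w ≤ ws.foldr (fun w r => max (pvRank w) r) 0 := by
  induction ws with
  | nil => simp at h
  | cons v ws ih =>
    simp only [List.foldr_cons]
    rcases List.mem_cons.mp h with h | h
    · subst h; exact Nat.le_max_left _ _
    · exact le_trans (ih h) (Nat.le_max_right _ _)

-- ===== VERDICT (by name: the statement is the Claim_ definition above) =====
theorem determine_overall_risk_level_spec : Claim_equal_determine_overall_risk_level := by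
  intro ws _
  unfold Spec_determine_overall_risk_level determine_overall_risk_level determine_overall_risk_level_alt
  have hfold : ws.foldl (fun m w => max m (pvPriorityGet ((PySem.Dict.mk w).get? "level"))) 0 =
      ws.foldr (fun w r => max (pvRank w) r) 0 := by
    simpa [pvRank] using pvFoldl_max ws 0
  rw [hfold]
  set M := ws.foldr (fun w r => max (pvRank w) r) 0 with hM
  by_cases h3 : ws.any (fun w => (PySem.Dict.mk w).get? "level" == some "ALERT")
  · -- some ALERT: M = 3
    obtain ⟨w, hw, he⟩ := List.any_eq_true.mp h3
    have h3' : pvRank w = 3 := (pvRank_eq_three_iff w).mpr (by simpa using he)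
    have hMe : M = 3 :=
      le_antisymm (pvMaxRank_le ws 3 (fun w _ => pvRank_le_three w))
        (h3' ▸ pvLe_maxRank ws w hw)
    simp [h3, hMe]
  · have hne3 : ∀ w ∈ ws, pvRank w ≠ 3 := by
      intro w hw hc
      exact h3 (List.any_eq_true.mpr ⟨w, hw, by simp [(pvRank_eq_three_iff w).mp hc]⟩)
    have hle2 : M ≤ 2 := pvMaxRank_le ws 2 (fun w hw => by
      have := pvRank_le_three w; have := hne3 w hw; omega)
    by_cases h2 : ws.any (fun w => (PySem.Dict.mk w).get? "level" == some "WARNING")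
    · obtain ⟨w, hw, he⟩ := List.any_eq_true.mp h2
      have h2' : pvRank w = 2 := (pvRank_eq_two_iff w).mpr (by simpa using he)
      have hMe : M = 2 := le_antisymm hle2 (h2' ▸ pvLe_maxRank ws w hw)
      simp [h3, h2, hMe]
    · have hne2 : ∀ w ∈ ws, pvRank w ≠ 2 := by
        intro w hw hc
        exact h2 (List.any_eq_true.mpr ⟨w, hw, by simp [(pvRank_eq_two_iff w).mp hc]⟩)
      have hle1 : M ≤ 1 := pvMaxRank_le ws 1 (fun w hw => by
        have := pvRank_le_three w; have := hne3 w hw; have := hne2 w hw; omega)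
      by_cases h1 : ws.any (fun w => (PySem.Dict.mk w).get? "level" == some "WATCH")
      · obtain ⟨w, hw, he⟩ := List.any_eq_true.mp h1
        have h1' : pvRank w = 1 := (pvRank_eq_one_iff w).mpr (by simpa using he)
        have hMe : M = 1 := le_antisymm hle1 (h1' ▸ pvLe_maxRank ws w hw)
        simp [h3, h2, h1, hMe]
      · have hne1 : ∀ w ∈ ws, pvRank w ≠ 1 := by
          intro w hw hc
          exact h1 (List.any_eq_true.mpr ⟨w, hw, by simp [(pvRank_eq_one_iff w).mp hc]⟩)
        have hMe : M = 0 := Nat.le_zero.mp (pvMaxRank_le ws 0 (fun w hw => by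
          have := pvRank_le_three w; have := hne3 w hw; have := hne2 w hw
          have := hne1 w hw; omega))
        simp [h3, h2, h1, hMe]
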